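-- pv_equiv track=rewrite | github.com/h4xg2qt47y-source/Tolupan | scripts/build_tts_dataset_v2.py | dp_align
-- ===== SOURCE A (Python) =====
-- def dp_align(verse_char_counts, silence_midpoints, total_duration_ms):
--     """
--     Dynamic programming to find optimal N-1 split points from silence midpoints
--     that minimize total squared error vs text-proportional timing.
--
--     verse_char_counts: list of char counts per verse
--     silence_midpoints: sorted list of silence midpoint times in ms
--     total_duration_ms: total audio duration
--
--     Returns: list of N segment boundaries [(start_ms, end_ms), ...]
--     """
--     n_verses = len(verse_char_counts)
--     if n_verses <= 1:
--         return [(0, total_duration_ms)]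
--
--     total_chars = sum(verse_char_counts)
--     if total_chars == 0:
--         return [(0, total_duration_ms)]
--
--     cumulative_chars = [0]
--     for c in verse_char_counts:
--         cumulative_chars.append(cumulative_chars[-1] + c)
--
--     target_times = []
--     for i in range(1, n_verses):
--         t = int(total_duration_ms * cumulative_chars[i] / total_chars)
--         target_times.append(t)
--
--     n_splits_needed = n_verses - 1
--     sil = sorted(silence_midpoints)
--
--     if len(sil) < n_splits_needed:
--         ideal = target_times
--         chosen = []
--         for t in ideal:
--             if sil:
--                 best = min(sil, key=lambda s: abs(s - t))
--                 chosen.append(best)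
--             else:
--                 chosen.append(t)
--         chosen.sort()
--     else:
--         S = len(sil)
--         INF = float('inf')
--         dp = [[INF] * (n_splits_needed + 1) for _ in range(S + 1)]
--         parent = [[-1] * (n_splits_needed + 1) for _ in range(S + 1)]
--
--         for j in range(S + 1):
--             dp[j][0] = 0
--
--         for k in range(1, n_splits_needed + 1):
--             target = target_times[k - 1]
--             for j in range(k, S + 1):
--                 cost = (sil[j - 1] - target) ** 2
--                 for prev_j in range(k - 1, j):
--                     total = dp[prev_j][k - 1] + cost
--                     if total < dp[j][k]:
--                         dp[j][k] = total
--                         parent[j][k] = prev_j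
--
--         best_cost = INF
--         best_end = -1
--         for j in range(n_splits_needed, S + 1):
--             if dp[j][n_splits_needed] < best_cost:
--                 best_cost = dp[j][n_splits_needed]
--                 best_end = j
--
--         chosen = []
--         j = best_end
--         for k in range(n_splits_needed, 0, -1):
--             chosen.append(sil[j - 1])
--             j = parent[j][k]
--         chosen.sort()
--
--     boundaries = [0] + chosen + [total_duration_ms]
--     segments = []
--     for i in range(len(boundaries) - 1):
--         segments.append((boundaries[i], boundaries[i + 1]))
--     return segments
-- ===== SOURCE B (Python) =====
-- def dp_align(verse_char_counts, silence_midpoints, total_duration_ms):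
--     """Same alignment as the original, but the DP's O(S) inner scan over
--     previous split indices is replaced by a running prefix-minimum (argmin),
--     so the table fill is O(K*S) instead of O(K*S^2), and only one dp column
--     is kept alive."""
--     n_verses = len(verse_char_counts)
--     if n_verses <= 1:
--         return [(0, total_duration_ms)]
--
--     total_chars = sum(verse_char_counts)
--     if total_chars == 0:
--         return [(0, total_duration_ms)]
--
--     # target split times straight from a running prefix sum
--     running = 0
--     target_times = []
--     for c in verse_char_counts[:-1]:
--         running += c
--         target_times.append(int(total_duration_ms * running / total_chars))
--
--     n_splits = n_verses - 1
--     sil = sorted(silence_midpoints)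
--     S = len(sil)
--
--     if S < n_splits:
--         chosen = sorted(
--             min(sil, key=lambda s: abs(s - t)) if sil else t
--             for t in target_times
--         )
--     else:
--         # prev[j] = cost of best way to place the first k-1 splits on the
--         # first j silences; entries below index k-1 are padding, never read.
--         prev = [0] * (S + 1)
--         parents = []
--         for k in range(1, n_splits + 1):
--             target = target_times[k - 1]
--             cur = [0] * k       # padding, never read
--             par = [-1] * k
--             best_val, best_idx = prev[k - 1], k - 1
--             for j in range(k, S + 1):
--                 cur.append(best_val + (sil[j - 1] - target) ** 2)
--                 par.append(best_idx)
--                 if prev[j] < best_val: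
--                     best_val, best_idx = prev[j], j
--             prev = cur
--             parents.append(par)
--
--         best_end = min(range(n_splits, S + 1), key=lambda j: prev[j])
--         chosen = []
--         j = best_end
--         for k in range(n_splits, 0, -1):
--             chosen.append(sil[j - 1])
--             j = parents[k - 1][j]
--         chosen.sort()
--
--     boundaries = [0] + chosen + [total_duration_ms]
--     return [(boundaries[i], boundaries[i + 1]) for i in range(len(boundaries) - 1)]
-- ===== Notes on version B (the rewrite author's own statement) =====
-- stated objective: faster
-- what changed: The DP's inner scan over all previous split positions is replaced by a running prefix-minimum (argmin) carried along each column, and only one dp column plus the parent rows are kept, turning the table fill from O(K*S^2) into O(K*S).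
import Mathlib
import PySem

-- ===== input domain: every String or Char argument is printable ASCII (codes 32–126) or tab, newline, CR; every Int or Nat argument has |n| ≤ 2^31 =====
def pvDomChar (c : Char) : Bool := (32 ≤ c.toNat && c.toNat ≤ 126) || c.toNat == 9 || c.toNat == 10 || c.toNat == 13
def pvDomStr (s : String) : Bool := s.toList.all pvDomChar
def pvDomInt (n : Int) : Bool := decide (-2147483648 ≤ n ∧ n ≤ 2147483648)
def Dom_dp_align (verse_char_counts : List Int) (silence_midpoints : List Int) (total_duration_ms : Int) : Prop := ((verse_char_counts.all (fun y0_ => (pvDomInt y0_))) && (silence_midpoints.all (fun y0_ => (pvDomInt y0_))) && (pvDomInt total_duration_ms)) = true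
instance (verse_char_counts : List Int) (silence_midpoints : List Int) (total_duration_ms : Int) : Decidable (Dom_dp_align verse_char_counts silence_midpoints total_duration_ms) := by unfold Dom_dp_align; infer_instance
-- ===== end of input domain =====

-- B replaces A's O(S) inner scan over previous split positions by a running
-- prefix-minimum (argmin) carried along each dp column: O(K*S) instead of O(K*S^2).

-- ===== PORT A =====
-- shared helper: exact integer model of CPython's `int(a / b)` — correctly-rounded
-- IEEE-754 double true division of two ints, then truncation toward zero
-- (exact while the quotient stays in the doubles' normal range, which the
-- magnitudes reachable here guarantee); both Pythons contain this very expression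
def pvRnCore (A B : Nat) (k : Int) : Nat × Nat × Nat :=
  let num := if 0 ≤ k then A <<< k.toNat else A
  let den := if 0 ≤ k then B else B <<< (-k).toNat
  (num / den, num % den, den)

def pvRnTruncDiv (a b : Int) : Int :=
  if a = 0 ∨ b = 0 then 0
  else
    let A := a.natAbs
    let B := b.natAbs
    let k0 : Int := 53 + (PySem.Int.bitLength b : Int) - (PySem.Int.bitLength a : Int)
    let t0 := pvRnCore A B k0
    let kt := if 2 ^ 53 ≤ t0.1 then (k0 - 1, pvRnCore A B (k0 - 1)) else (k0, t0)
    let k := kt.1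
    let q := kt.2.1
    let r := kt.2.2.1
    let den := kt.2.2.2
    let q' := if den < 2 * r ∨ (2 * r = den ∧ q % 2 = 1) then q + 1 else q
    let res : Nat := if 0 ≤ k then q' >>> k.toNat else q' <<< (-k).toNat
    if (decide (a < 0)) ≠ (decide (b < 0)) then -(res : Int) else (res : Int)

-- Python's `x < y` where either side may be float('inf') (`none`)
def pvOptLT : Option Int → Option Int → Bool
  | some x, some y => decide (x < y)
  | some _, none => true
  | _, _ => false

-- shared: `min(sil, key=lambda s: abs(s - t)) if sil else t` (both Pythons)
def pvNearest (sil : List Int) (t : Int) : Int :=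
  match PySem.List.min? sil (fun s => |s - t|) with
  | some best => best
  | none => t

-- A's loop body for `for k in range(1, n_splits_needed + 1)`: fills dp/parent
-- column k (st.1 = dp column k-1, st.2 = parent columns 1..k-1)
def pvStepA (targets sil : List Int) (S : Int)
    (st : List (Option Int) × List (List Int)) (k : Int) :
    List (Option Int) × List (List Int) :=
  let prev := st.1
  let target := PySem.List.pyGetD targets (k-1) 0
  let col := (PySem.List.pyRange 0 (S+1) 1).map (fun j =>
    if j < k then ((none : Option Int), (-1 : Int))
    else
      let cost := (PySem.List.pyGetD sil (j-1) 0 - target)^2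
      (PySem.List.pyRange (k-1) j 1).foldl
        (fun (st2 : Option Int × Int) pj =>
          let tot := (PySem.List.pyGetD prev pj none).map (· + cost)
          if pvOptLT tot st2.1 then (tot, pj) else st2)
        (none, -1))
  (col.map Prod.fst, st.2 ++ [col.map Prod.snd])

-- shared: the backtracking loop `for k in range(n_splits_needed, 0, -1)` (both Pythons)
def pvBacktrack (pcols : List (List Int)) (sil : List Int) (K best_end : Int) : List Int :=
  ((PySem.List.pyRange K 0 (-1)).foldl
    (fun (st3 : List Int × Int) k =>
      (st3.1 ++ [PySem.List.pyGetD sil (st3.2 - 1) 0],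
       PySem.List.pyGetD (PySem.List.pyGetD pcols (k-1) []) st3.2 (-1)))
    ([], best_end)).1

-- shared: boundaries = [0] + chosen + [total]; consecutive pairs (both Pythons)
def pvSegments (chosen : List Int) (total_duration_ms : Int) : List (Int × Int) :=
  let boundaries := [(0:Int)] ++ chosen ++ [total_duration_ms]
  (PySem.List.pyRange 0 ((boundaries.length : Int) - 1) 1).map
    (fun i => (PySem.List.pyGetD boundaries i 0, PySem.List.pyGetD boundaries (i+1) 0))

def dp_align (verse_char_counts : List Int) (silence_midpoints : List Int) (total_duration_ms : Int) : List (Int × Int) :=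
  let n : Int := verse_char_counts.length
  if n ≤ 1 then [(0, total_duration_ms)] else
  let total := verse_char_counts.sum
  if total = 0 then [(0, total_duration_ms)] else
  let cum := verse_char_counts.foldl
    (fun acc c => acc ++ [PySem.List.pyGetD acc (-1) 0 + c]) [0]
  let targets := (PySem.List.pyRange 1 n 1).map
    (fun i => pvRnTruncDiv (total_duration_ms * PySem.List.pyGetD cum i 0) total)
  let K : Int := n - 1
  let sil := PySem.List.sorted silence_midpoints (fun s => s)
  let S : Int := sil.length
  let chosen :=
    if S < K then
      let ch := targets.foldl (fun acc t => acc ++ [pvNearest sil t]) []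
      PySem.List.sorted ch (fun x => x)
    else
      let st := (PySem.List.pyRange 1 (K+1) 1).foldl (pvStepA targets sil S)
        (List.replicate (S+1).toNat (some 0), [])
      let dpK := st.1
      let parcols := st.2
      let be := (PySem.List.pyRange K (S+1) 1).foldl
        (fun (b : Option Int × Int) j =>
          if pvOptLT (PySem.List.pyGetD dpK j none) b.1
            then (PySem.List.pyGetD dpK j none, j) else b)
        (none, -1)
      PySem.List.sorted (pvBacktrack parcols sil K be.2) (fun x => x)
  pvSegments chosen total_duration_ms

-- ===== PORT B =====
-- B's loop body for `for k in range(1, n_splits + 1)`: one pass over j keeping a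
-- running prefix-minimum (best_val, best_idx) of the previous dp column
def pvStepB (targets sil : List Int) (S : Int)
    (st : List Int × List (List Int)) (k : Int) : List Int × List (List Int) :=
  let prev := st.1
  let target := PySem.List.pyGetD targets (k-1) 0
  let inner := (PySem.List.pyRange k (S+1) 1).foldl
    (fun (w : List Int × List Int × Int × Int) j =>
      (w.1 ++ [w.2.2.1 + (PySem.List.pyGetD sil (j-1) 0 - target)^2],
       w.2.1 ++ [w.2.2.2],
       if PySem.List.pyGetD prev j 0 < w.2.2.1
         then (PySem.List.pyGetD prev j 0, j) else (w.2.2.1, w.2.2.2)))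
    (List.replicate k.toNat 0, List.replicate k.toNat (-1),
     PySem.List.pyGetD prev (k-1) 0, k-1)
  (inner.1, st.2 ++ [inner.2.1])

def dp_align_alt (verse_char_counts : List Int) (silence_midpoints : List Int) (total_duration_ms : Int) : List (Int × Int) :=
  let n : Int := verse_char_counts.length
  if n ≤ 1 then [(0, total_duration_ms)] else
  let total := verse_char_counts.sum
  if total = 0 then [(0, total_duration_ms)] else
  let tst := verse_char_counts.dropLast.foldl   -- verse_char_counts[:-1]
    (fun (st : Int × List Int) c =>
      (st.1 + c, st.2 ++ [pvRnTruncDiv (total_duration_ms * (st.1 + c)) total]))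
    (0, [])
  let targets := tst.2
  let K : Int := n - 1
  let sil := PySem.List.sorted silence_midpoints (fun s => s)
  let S : Int := sil.length
  let chosen :=
    if S < K then
      PySem.List.sorted (targets.map (fun t => pvNearest sil t)) (fun x => x)
    else
      let st := (PySem.List.pyRange 1 (K+1) 1).foldl (pvStepB targets sil S)
        (List.replicate (S+1).toNat 0, [])
      let prev := st.1
      let parents := st.2
      let best_end := PySem.List.minD (PySem.List.pyRange K (S+1) 1)
        (fun j => PySem.List.pyGetD prev j 0) (-1)
      PySem.List.sorted (pvBacktrack parents sil K best_end) (fun x => x)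
  pvSegments chosen total_duration_ms

-- ===== PRECONDITION & SPEC =====
def Spec_dp_align (verse_char_counts : List Int) (silence_midpoints : List Int) (total_duration_ms : Int) (out : List (Int × Int)) : Prop := out = dp_align_alt verse_char_counts silence_midpoints total_duration_ms
instance (verse_char_counts : List Int) (silence_midpoints : List Int) (total_duration_ms : Int) (out : List (Int × Int)) : Decidable (Spec_dp_align verse_char_counts silence_midpoints total_duration_ms out) := by unfold Spec_dp_align; infer_instance

-- ===== CLAIM (what is proved, stated in full; the proofs are below) =====
def Claim_equal_dp_align : Prop := ∀ (verse_char_counts : List Int) (silence_midpoints : List Int) (total_duration_ms : Int), Dom_dp_align verse_char_counts silence_midpoints total_duration_ms → Spec_dp_align verse_char_counts silence_midpoints total_duration_ms (dp_align verse_char_counts silence_midpoints total_duration_ms)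

-- ===== LEMMAS AND PROOFS =====

lemma pvGetD_last (l : List Int) (r : Int) :
    PySem.List.pyGetD (l ++ [r]) (-1) 0 = r := by
  simp [PySem.List.pyGetD, PySem.List.pyGet?, PySem.List.pyIdx?]

lemma pvGetD_cons_succ {α : Type} (x : α) (l : List α) (i : Int) (d : α) (h : 0 ≤ i) :
    PySem.List.pyGetD (x :: l) (i + 1) d = PySem.List.pyGetD l i d := by
  simp only [PySem.List.pyGetD, PySem.List.pyGet?, PySem.List.pyIdx?, List.length_cons]
  have h1 : (0:Int) ≤ i + 1 := by omega
  rw [if_pos h1, if_pos h]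
  by_cases h2 : i < (l.length : Int)
  · rw [if_pos (by push_cast; omega), if_pos h2]
    have : (i+1).toNat = i.toNat + 1 := by omega
    simp [this]
  · rw [if_neg (by push_cast; omega), if_neg h2]
    simp

lemma pvGetD_replicate {α : Type} (m : Nat) (x d : α) (t : Int)
    (h0 : 0 ≤ t) (h1 : t < (m : Int)) :
    PySem.List.pyGetD (List.replicate m x) t d = x := by
  rw [PySem.List.pyGetD_eq_getElem _ d h0 (by simpa using h1)]
  simp

lemma pvGetD_pad_map {α : Type} (X d : α) (f : Int → α) (k m t : Int)
    (h0 : 0 ≤ k) (hk : k ≤ t) (ht : t < m) :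
    PySem.List.pyGetD (List.replicate k.toNat X ++ (PySem.List.pyRange k m 1).map f) t d
      = f t := by
  have hlen : ((List.replicate k.toNat X ++ (PySem.List.pyRange k m 1).map f).length : Int)
      = k + (m - k) := by
    simp [PySem.List.length_pyRange_one]; omega
  rw [PySem.List.pyGetD_eq_getElem _ d (by omega) (by rw [hlen]; omega)]
  rw [List.getElem_append_right (by simp; omega)]
  rw [List.getElem_map]
  rw [PySem.List.getElem_pyRange_one]
  simp only [List.length_replicate]
  congr 1
  omega

lemma pvRange_shift (a b : Int) :
    PySem.List.pyRange (a+1) (b+1) 1 = (PySem.List.pyRange a b 1).map (· + 1) := by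
  apply List.ext_getElem
  · simp [PySem.List.length_pyRange_one]
  · intro i h1 h2
    rw [List.getElem_map, PySem.List.getElem_pyRange_one, PySem.List.getElem_pyRange_one]
    omega

def pvPre (xs : List Int) (r : Int) : List Int :=
  match xs with
  | [] => [r]
  | c :: t => r :: pvPre t (r + c)

def pvTg (φ : Int → Int) (xs : List Int) (r : Int) : List Int :=
  match xs with
  | [] => []
  | c :: t => φ (r + c) :: pvTg φ t (r + c)

lemma pvCum_eq (xs : List Int) : ∀ (pre : List Int) (r : Int),
    xs.foldl (fun acc c => acc ++ [PySem.List.pyGetD acc (-1) 0 + c]) (pre ++ [r])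
      = pre ++ pvPre xs r := by
  induction xs with
  | nil => intro pre r; simp [pvPre]
  | cons c t ih =>
    intro pre r
    simp only [List.foldl_cons, pvGetD_last]
    have : pre ++ [r] ++ [r + c] = (pre ++ [r]) ++ [r + c] := by simp
    rw [this, ih (pre ++ [r]) (r + c)]
    simp [pvPre]

lemma pvTgFold_eq (φ : Int → Int) (xs : List Int) : ∀ (r : Int) (acc : List Int),
    xs.foldl (fun (st : Int × List Int) c => (st.1 + c, st.2 ++ [φ (st.1 + c)])) (r, acc)
      = (r + xs.sum, acc ++ pvTg φ xs r) := by
  induction xs with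
  | nil => intro r acc; simp [pvTg]
  | cons c t ih =>
    intro r acc
    simp only [List.foldl_cons]
    rw [ih (r + c) (acc ++ [φ (r + c)])]
    simp [pvTg, List.sum_cons]
    omega

lemma pvMapPre (φ : Int → Int) (xs : List Int) : ∀ (r : Int),
    (PySem.List.pyRange 1 (xs.length : Int) 1).map
      (fun i => φ (PySem.List.pyGetD (pvPre xs r) i 0))
      = pvTg φ xs.dropLast r := by
  induction xs with
  | nil => intro r; simp [PySem.List.pyRange_one_eq_nil, pvTg]
  | cons c t ih =>
    intro r
    match t with
    | [] => simp [PySem.List.pyRange_one_eq_nil, pvTg]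
    | c2 :: t2 =>
      have hlen : ((c :: c2 :: t2).length : Int) = (c2 :: t2).length + 1 := by simp
      rw [hlen]
      have h1 : (1:Int) ≤ ((c2 :: t2).length : Int) := by simp only [List.length_cons]; push_cast; omega
      rw [PySem.List.pyRange_one_cons (by omega)]
      simp only [List.map_cons]
      have e0 : PySem.List.pyGetD (pvPre (c :: c2 :: t2) r) 1 0 = r + c := by
        show PySem.List.pyGetD (r :: pvPre (c2 :: t2) (r + c)) (0 + 1) 0 = r + c
        rw [pvGetD_cons_succ _ _ _ _ (by omega)]
        simp [pvPre, PySem.List.pyGetD_of_nonneg]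
      rw [e0]
      have e1 : PySem.List.pyRange 2 (((c2 :: t2).length : Int) + 1) 1
          = (PySem.List.pyRange 1 ((c2 :: t2).length : Int) 1).map (· + 1) := by
        have := pvRange_shift 1 ((c2 :: t2).length : Int)
        simpa using this
      norm_num only
      rw [e1, List.map_map]
      have e2 : ((PySem.List.pyRange 1 ((c2 :: t2).length : Int) 1).map
            ((fun i => φ (PySem.List.pyGetD (pvPre (c :: c2 :: t2) r) i 0)) ∘ (· + 1)))
          = (PySem.List.pyRange 1 ((c2 :: t2).length : Int) 1).map
            (fun i => φ (PySem.List.pyGetD (pvPre (c2 :: t2) (r + c)) i 0)) := by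
        apply List.map_congr_left
        intro i hi
        have hi' := PySem.List.mem_pyRange_one.mp hi
        simp only [Function.comp]
        congr 1
        show PySem.List.pyGetD (r :: pvPre (c2 :: t2) (r + c)) (i + 1) 0 = _
        rw [pvGetD_cons_succ _ _ _ _ (by omega)]
      rw [e2, ih (r + c)]
      simp [pvTg]

lemma pvTargets_eq (T tot : Int) (vcc : List Int) :
    (PySem.List.pyRange 1 (vcc.length : Int) 1).map
      (fun i => pvRnTruncDiv (T * PySem.List.pyGetD
        (vcc.foldl (fun acc c => acc ++ [PySem.List.pyGetD acc (-1) 0 + c]) [0]) i 0) tot)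
    = (vcc.dropLast.foldl
        (fun (st : Int × List Int) c =>
          (st.1 + c, st.2 ++ [pvRnTruncDiv (T * (st.1 + c)) tot])) (0, [])).2 := by
  have hc : vcc.foldl (fun acc c => acc ++ [PySem.List.pyGetD acc (-1) 0 + c]) [0]
      = pvPre vcc 0 := by
    have := pvCum_eq vcc [] 0
    simpa using this
  rw [hc]
  have hf := pvTgFold_eq (fun v => pvRnTruncDiv (T * v) tot) vcc.dropLast 0 []
  rw [hf]
  simpa using pvMapPre (fun v => pvRnTruncDiv (T * v) tot) vcc 0

def pvBest (prevB : List Int) (k j : Int) : Int × Int :=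
  (PySem.List.pyRange k j 1).foldl
    (fun st t => if PySem.List.pyGetD prevB t 0 < st.1
      then (PySem.List.pyGetD prevB t 0, t) else st)
    (PySem.List.pyGetD prevB (k-1) 0, k-1)

lemma pvBest_self (prevB : List Int) (k : Int) :
    pvBest prevB k k = (PySem.List.pyGetD prevB (k-1) 0, k-1) := by
  simp [pvBest, PySem.List.pyRange_one_eq_nil le_rfl]

lemma pvBest_succ (prevB : List Int) (k j : Int) (h : k ≤ j) :
    pvBest prevB k (j+1)
      = (if PySem.List.pyGetD prevB j 0 < (pvBest prevB k j).1
          then (PySem.List.pyGetD prevB j 0, j) else pvBest prevB k j) := by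
  unfold pvBest
  rw [PySem.List.pyRange_one_succ_right h, List.foldl_append]
  simp

lemma pvInnerA_eq (prevA : List (Option Int)) (prevB : List Int) (cost k : Int) :
    ∀ (j : Int), k ≤ j →
    (∀ t, k - 1 ≤ t → t < j →
      PySem.List.pyGetD prevA t none = some (PySem.List.pyGetD prevB t 0)) →
    (PySem.List.pyRange (k-1) j 1).foldl
      (fun (st2 : Option Int × Int) pj =>
        let tot := (PySem.List.pyGetD prevA pj none).map (· + cost)
        if pvOptLT tot st2.1 then (tot, pj) else st2)
      (none, -1)
    = (some ((pvBest prevB k j).1 + cost), (pvBest prevB k j).2) := by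
  intro j hkj
  obtain ⟨m, rfl⟩ : ∃ m : Nat, j = k + (m : Int) := ⟨(j - k).toNat, by omega⟩
  clear hkj
  induction m with
  | zero =>
    intro hrel
    have h0 : k + ((0:Nat) : Int) = (k - 1) + 1 := by omega
    rw [h0, PySem.List.pyRange_one_succ_right le_rfl,
      PySem.List.pyRange_one_eq_nil le_rfl]
    have hv := hrel (k-1) le_rfl (by omega)
    simp only [List.nil_append, List.foldl_cons, List.foldl_nil, hv]
    have hb : pvBest prevB k (k - 1 + 1) = (PySem.List.pyGetD prevB (k-1) 0, k-1) := by
      rw [show k - 1 + 1 = k by omega, pvBest_self]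
    rw [hb]
    simp [pvOptLT]
  | succ p ih =>
    intro hrel
    have hrel' : ∀ t, k - 1 ≤ t → t < k + (p : Int) →
        PySem.List.pyGetD prevA t none = some (PySem.List.pyGetD prevB t 0) := by
      intro t h1 h2; exact hrel t h1 (by push_cast; omega)
    have hstep : k + ((p+1 : Nat) : Int) = (k + (p : Int)) + 1 := by push_cast; omega
    rw [hstep, PySem.List.pyRange_one_succ_right (by omega), List.foldl_append,
      ih hrel']
    have hv := hrel (k + (p : Int)) (by omega) (by push_cast; omega)
    rw [pvBest_succ prevB k (k + (p : Int)) (by omega)]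
    simp only [List.foldl_cons, List.foldl_nil, hv]
    by_cases hlt : PySem.List.pyGetD prevB (k + (p : Int)) 0 < (pvBest prevB k (k + (p : Int))).1
    · rw [if_pos hlt]
      have : pvOptLT (some (PySem.List.pyGetD prevB (k + (p : Int)) 0 + cost))
          (some ((pvBest prevB k (k + (p : Int))).1 + cost)) = true := by
        simp [pvOptLT]; omega
      simp [this]
    · rw [if_neg hlt]
      have : pvOptLT (some (PySem.List.pyGetD prevB (k + (p : Int)) 0 + cost))
          (some ((pvBest prevB k (k + (p : Int))).1 + cost)) = false := by
        simp [pvOptLT]; omega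
      simp [this]

lemma pvInnerB_eq (prevB sil : List Int) (target k : Int) :
    ∀ (m : Int), k ≤ m → ∀ (c0 p0 : List Int),
    (PySem.List.pyRange k m 1).foldl
      (fun (w : List Int × List Int × Int × Int) j =>
        (w.1 ++ [w.2.2.1 + (PySem.List.pyGetD sil (j-1) 0 - target)^2],
         w.2.1 ++ [w.2.2.2],
         if PySem.List.pyGetD prevB j 0 < w.2.2.1
           then (PySem.List.pyGetD prevB j 0, j) else (w.2.2.1, w.2.2.2)))
      (c0, p0, PySem.List.pyGetD prevB (k-1) 0, k-1)
    = (c0 ++ (PySem.List.pyRange k m 1).map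
          (fun j => (pvBest prevB k j).1 + (PySem.List.pyGetD sil (j-1) 0 - target)^2),
       p0 ++ (PySem.List.pyRange k m 1).map (fun j => (pvBest prevB k j).2),
       pvBest prevB k m) := by
  intro m hkm
  obtain ⟨n, rfl⟩ : ∃ n : Nat, m = k + (n : Int) := ⟨(m - k).toNat, by omega⟩
  clear hkm
  induction n with
  | zero =>
    intro c0 p0
    rw [show k + ((0:Nat) : Int) = k by omega]
    rw [PySem.List.pyRange_one_eq_nil le_rfl]
    simp [pvBest_self]
  | succ p ih =>
    intro c0 p0
    rw [show k + ((p+1 : Nat) : Int) = (k + (p : Int)) + 1 by push_cast; omega]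
    rw [PySem.List.pyRange_one_succ_right (by omega), List.foldl_append, ih]
    rw [pvBest_succ prevB k (k + (p : Int)) (by omega)]
    simp only [List.foldl_cons, List.foldl_nil, List.map_append, List.map_cons,
      List.map_nil, List.append_assoc]

def pvInv (S kk : Int) (stA : List (Option Int) × List (List Int))
    (stB : List Int × List (List Int)) : Prop :=
  stA.2 = stB.2 ∧
  ∀ t, kk - 1 ≤ t → t ≤ S →
    PySem.List.pyGetD stA.1 t none = some (PySem.List.pyGetD stB.1 t 0)

lemma pvStep_inv (targets sil : List Int) (S k : Int) (hk : 1 ≤ k) (hkS : k ≤ S)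
    (stA : List (Option Int) × List (List Int)) (stB : List Int × List (List Int))
    (h : pvInv S k stA stB) :
    pvInv S (k+1) (pvStepA targets sil S stA k) (pvStepB targets sil S stB k) := by
  obtain ⟨hpar, hrel⟩ := h
  have hcol : ((PySem.List.pyRange 0 (S+1) 1).map (fun j =>
      if j < k then ((none : Option Int), (-1 : Int))
      else
        let cost := (PySem.List.pyGetD sil (j-1) 0 - PySem.List.pyGetD targets (k-1) 0)^2
        (PySem.List.pyRange (k-1) j 1).foldl
          (fun (st2 : Option Int × Int) pj =>
            let tot := (PySem.List.pyGetD stA.1 pj none).map (· + cost)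
            if pvOptLT tot st2.1 then (tot, pj) else st2)
          (none, -1)))
      = List.replicate k.toNat ((none : Option Int), (-1 : Int))
        ++ (PySem.List.pyRange k (S+1) 1).map (fun j =>
            (some ((pvBest stB.1 k j).1
              + (PySem.List.pyGetD sil (j-1) 0 - PySem.List.pyGetD targets (k-1) 0)^2),
             (pvBest stB.1 k j).2)) := by
    rw [PySem.List.pyRange_one_append 0 k (S+1) (by omega) (by omega), List.map_append]
    congr 1
    · have hconst : ∀ j ∈ PySem.List.pyRange 0 k 1, (fun j =>
          if j < k then ((none : Option Int), (-1 : Int))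
          else
            let cost := (PySem.List.pyGetD sil (j-1) 0 - PySem.List.pyGetD targets (k-1) 0)^2
            (PySem.List.pyRange (k-1) j 1).foldl
              (fun (st2 : Option Int × Int) pj =>
                let tot := (PySem.List.pyGetD stA.1 pj none).map (· + cost)
                if pvOptLT tot st2.1 then (tot, pj) else st2)
              (none, -1)) j = ((none : Option Int), (-1 : Int)) := by
        intro j hj
        have := PySem.List.mem_pyRange_one.mp hj
        simp only [if_pos this.2]
      rw [List.map_congr_left hconst]
      simp [PySem.List.length_pyRange_one]
    · apply List.map_congr_left
      intro j hj
      have hj' := PySem.List.mem_pyRange_one.mp hj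
      simp only [if_neg (by omega : ¬ j < k)]
      exact pvInnerA_eq stA.1 stB.1 _ k j (by omega)
        (fun t h1 h2 => hrel t h1 (by omega))
  have hinner := pvInnerB_eq stB.1 sil (PySem.List.pyGetD targets (k-1) 0) k (S+1)
    (by omega) (List.replicate k.toNat 0) (List.replicate k.toNat (-1))
  simp only [pvStepA, pvStepB, hcol, hinner]
  constructor
  · simp only [hpar, List.map_append, List.map_replicate, List.map_map]
    rfl
  · intro t h1 h2
    simp only [List.map_append, List.map_replicate, List.map_map]
    rw [pvGetD_pad_map _ _ _ k (S+1) t (by omega) (by omega) (by omega),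
        pvGetD_pad_map _ _ _ k (S+1) t (by omega) (by omega) (by omega)]
    rfl

lemma pvOuter_inv (targets sil : List Int) (S K : Int) (hK : K ≤ S) :
    ∀ (fuel : Nat) (a : Int), (K + 1 - a).toNat = fuel → 1 ≤ a → a ≤ K + 1 →
    ∀ stA stB, pvInv S a stA stB →
    pvInv S (K+1)
      ((PySem.List.pyRange a (K+1) 1).foldl (pvStepA targets sil S) stA)
      ((PySem.List.pyRange a (K+1) 1).foldl (pvStepB targets sil S) stB) := by
  intro fuel
  induction fuel with
  | zero =>
    intro a hfuel h1 h2 stA stB hinv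
    have : a = K + 1 := by omega
    subst this
    rw [PySem.List.pyRange_one_eq_nil le_rfl]
    simpa using hinv
  | succ p ih =>
    intro a hfuel h1 h2 stA stB hinv
    have ha : a < K + 1 := by omega
    rw [PySem.List.pyRange_one_cons ha]
    simp only [List.foldl_cons]
    exact ih (a+1) (by omega) (by omega) (by omega) _ _
      (pvStep_inv targets sil S a h1 (by omega) stA stB hinv)

lemma pvBestEnd_eq (dpA : List (Option Int)) (pB : List Int) (l : List Int)
    (h : ∀ t ∈ l, PySem.List.pyGetD dpA t none = some (PySem.List.pyGetD pB t 0)) :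
    (l.foldl
      (fun (b : Option Int × Int) j =>
        if pvOptLT (PySem.List.pyGetD dpA j none) b.1
          then (PySem.List.pyGetD dpA j none, j) else b)
      (none, -1)).2
    = PySem.List.minD l (fun j => PySem.List.pyGetD pB j 0) (-1) := by
  have key : ∀ (l' : List Int), (∀ t ∈ l', PySem.List.pyGetD dpA t none
        = some (PySem.List.pyGetD pB t 0)) → ∀ (m : Option Int),
      l'.foldl
        (fun (b : Option Int × Int) j =>
          if pvOptLT (PySem.List.pyGetD dpA j none) b.1
            then (PySem.List.pyGetD dpA j none, j) else b)
        (match m with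
         | none => ((none : Option Int), (-1 : Int))
         | some u => (some (PySem.List.pyGetD pB u 0), u))
      = (match l'.foldl
          (fun acc x =>
            match acc with
            | none => some x
            | some mm => if PySem.List.pyGetD pB x 0 < PySem.List.pyGetD pB mm 0
                then some x else some mm)
          m with
         | none => ((none : Option Int), (-1 : Int))
         | some u => (some (PySem.List.pyGetD pB u 0), u)) := by
    intro l'
    induction l' with
    | nil => intro _ m; simp
    | cons x xs ih =>
      intro hx m
      have hvx := hx x (by simp)
      simp only [List.foldl_cons, hvx]
      match m with
      | none =>
        simp only [pvOptLT]
        exact ih (fun t ht => hx t (by simp [ht])) (some x)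
      | some u =>
        simp only [pvOptLT]
        by_cases hlt : PySem.List.pyGetD pB x 0 < PySem.List.pyGetD pB u 0
        · simp only [hlt, decide_true, if_pos trivial]
          have := ih (fun t ht => hx t (by simp [ht])) (some x)
          simpa using this
        · simp only [hlt, decide_false]
          have := ih (fun t ht => hx t (by simp [ht])) (some u)
          simpa using this
  have hmm : PySem.List.minD l (fun j => PySem.List.pyGetD pB j 0) (-1)
      = (List.foldl
          (fun acc x =>
            match acc with
            | none => some x
            | some mm => if PySem.List.pyGetD pB x 0 < PySem.List.pyGetD pB mm 0
                then some x else some mm)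
          none l).getD (-1) := by
    unfold PySem.List.minD
    congr 1
    unfold PySem.List.min?
    congr 1
    funext acc x
    cases acc <;> rfl
  have hk := key l h none
  simp only at hk
  rw [hk, hmm]
  cases List.foldl
      (fun acc x =>
        match acc with
        | none => some x
        | some mm => if PySem.List.pyGetD pB x 0 < PySem.List.pyGetD pB mm 0
            then some x else some mm)
      none l <;> rfl

-- ===== VERDICT (by name: the statement is the Claim_ definition above) =====
theorem dp_align_spec : Claim_equal_dp_align := by
  intro vcc sil0 T _dom
  unfold Spec_dp_align dp_align dp_align_alt
  dsimp only
  by_cases h1 : ((vcc.length : Int)) ≤ 1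
  · simp only [if_pos h1]
  · simp only [if_neg h1]
    by_cases h2 : vcc.sum = 0
    · simp only [if_pos h2]
    · simp only [if_neg h2]
      rw [pvTargets_eq T vcc.sum vcc]
      congr 1
      by_cases h3 : ((PySem.List.sorted sil0 (fun s => s) false).length : Int) < (vcc.length : Int) - 1
      · simp only [if_pos h3]
        rw [PySem.List.foldl_append_singleton_eq_map]
        simp
      · simp only [if_neg h3]
        set sil := PySem.List.sorted sil0 (fun s => s) false with hsil
        set S : Int := (sil.length : Int) with hS
        set K : Int := (vcc.length : Int) - 1 with hKdef
        set targets := (vcc.dropLast.foldl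
          (fun (st : Int × List Int) c =>
            (st.1 + c, st.2 ++ [pvRnTruncDiv (T * (st.1 + c)) vcc.sum])) (0, [])).2 with htg
        have hK1 : (1:Int) ≤ K := by rw [hKdef]; omega
        have hKS : K ≤ S := by omega
        have hS0 : (0:Int) ≤ S := by rw [hS]; positivity
        have hinit : pvInv S 1
            (List.replicate (S+1).toNat (some 0), ([] : List (List Int)))
            (List.replicate (S+1).toNat 0, ([] : List (List Int))) := by
          refine ⟨rfl, ?_⟩
          intro t ht1 ht2
          rw [pvGetD_replicate _ _ _ t (by omega) (by omega),
              pvGetD_replicate _ _ _ t (by omega) (by omega)]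
        have hinv := pvOuter_inv targets sil S K hKS (K + 1 - 1).toNat 1 rfl le_rfl
          (by omega) _ _ hinit
        obtain ⟨hpar, hrel⟩ := hinv
        have hbe := pvBestEnd_eq
          ((PySem.List.pyRange 1 (K+1) 1).foldl (pvStepA targets sil S)
            (List.replicate (S+1).toNat (some 0), [])).1
          ((PySem.List.pyRange 1 (K+1) 1).foldl (pvStepB targets sil S)
            (List.replicate (S+1).toNat 0, [])).1
          (PySem.List.pyRange K (S+1) 1)
          (by
            intro t ht
            have := PySem.List.mem_pyRange_one.mp ht
            exact hrel t (by omega) (by omega))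
        rw [hpar, hbe]
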